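-- pv_equiv track=rewrite | github.com/Nama21yo/Natnael_CP | A2SV G6 - Round #2 20-Feb-2025/C - The Splitting Game 276906.py | solve
-- ===== SOURCE A (Python) =====
-- def solve(s,n):
--     right_count = [0] * 26
--     left_count = [0] * 26
--     # Count distinct characters in the full string
--     for ch in s:
--         right_count[ord(ch) - ord('a')] += 1
--
--     distinct_right = sum(1 for x in right_count if x > 0)
--     distinct_left = 0
--     max_sum = 0
--
--     # Iterate through the string and move characters from right to left
--     for i in range(n - 1):
--         char_index = ord(s[i]) - ord('a')
--
--         # Move this character to the left partition
--         if left_count[char_index] == 0: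
--             distinct_left += 1
--         left_count[char_index] += 1
--
--         # Remove from right partition
--         right_count[char_index] -= 1
--         if right_count[char_index] == 0:
--             distinct_right -= 1
--
--         # Update the max distinct sum
--         max_sum = max(max_sum, distinct_left + distinct_right)
--
--     return max_sum
-- ===== SOURCE B (Python) =====
-- def solve(s, n):
--     m = len(s)
--     prefix = []
--     seen = set()
--     for ch in s:
--         seen.add(ch)
--         prefix.append(len(seen))
--     suffix = [0] * (m + 1)
--     seen = set()
--     for j in range(m - 1, -1, -1):
--         seen.add(s[j])
--         suffix[j] = len(seen)
--     return max((prefix[i] + suffix[i + 1] for i in range(n - 1)), default=0)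
-- ===== Notes on version B (the rewrite author's own statement) =====
-- stated objective: alternative
-- what changed: Replaces A's single fused loop that mutates two 26-bucket count arrays and four running counters with two independent table-building passes (prefix-distinct and suffix-distinct lists built with sets) plus a separate combining max pass.
-- outside the precondition, e.g. on solve('Gaa', 3): A returns 2, B returns 3
import Mathlib
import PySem

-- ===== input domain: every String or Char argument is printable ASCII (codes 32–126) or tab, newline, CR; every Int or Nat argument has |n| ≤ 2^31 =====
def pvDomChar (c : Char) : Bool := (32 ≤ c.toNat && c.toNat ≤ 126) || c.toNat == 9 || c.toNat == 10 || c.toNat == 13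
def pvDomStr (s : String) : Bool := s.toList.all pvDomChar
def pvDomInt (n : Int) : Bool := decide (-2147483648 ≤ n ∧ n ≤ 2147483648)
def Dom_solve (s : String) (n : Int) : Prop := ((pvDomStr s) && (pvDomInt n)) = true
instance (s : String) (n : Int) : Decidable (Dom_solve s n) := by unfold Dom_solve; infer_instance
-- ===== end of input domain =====

-- B replaces A's fused loop (two 26-bucket count arrays + four running counters) by two
-- independent table-building passes (prefix/suffix distinct counts via sets) and a combining
-- max pass; same cost, different decomposition (objective: alternative).

-- ===== PORT A =====
-- full-string bucket counts: `for ch in s: right_count[ord(ch)-ord('a')] += 1`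
def rightInit (s : String) : List Int :=
  s.toList.foldl
    (fun rc ch =>
      PySem.List.pySetD rc ((ch.toNat : Int) - 97)
        (PySem.List.pyGetD rc ((ch.toNat : Int) - 97) 0 + 1))
    (List.replicate 26 0)

-- loop body of `for i in range(n-1)`; state = (left_count, right_count, distinct_left, distinct_right, max_sum)
def stepA (s : String) (st : List Int × List Int × Int × Int × Int) (i : Int) :
    List Int × List Int × Int × Int × Int :=
  let ch := (PySem.Str.pyGet? s i).getD 'a'   -- s[i]; the default is unreachable under Pre_solve
  let ci := (ch.toNat : Int) - 97
  let dl := if PySem.List.pyGetD st.1 ci 0 == 0 then st.2.2.1 + 1 else st.2.2.1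
  let lc := PySem.List.pySetD st.1 ci (PySem.List.pyGetD st.1 ci 0 + 1)
  let rc := PySem.List.pySetD st.2.1 ci (PySem.List.pyGetD st.2.1 ci 0 - 1)
  let dr := if PySem.List.pyGetD rc ci 0 == 0 then st.2.2.2.1 - 1 else st.2.2.2.1
  (lc, rc, dl, dr, max st.2.2.2.2 (dl + dr))

def solve (s : String) (n : Int) : Int :=
  let right0 := rightInit s
  let distinctRight0 : Int := ((right0.filter (fun x => decide (0 < x))).length : Int)  -- sum(1 for x in right_count if x > 0)
  ((PySem.List.pyRange 0 (n - 1) 1).foldl (stepA s)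
    (List.replicate 26 0, right0, 0, distinctRight0, 0)).2.2.2.2

-- ===== PORT B =====
-- prefix pass: `for ch in s: seen.add(ch); prefix.append(len(seen))`
def goPrefix : List Char → PySem.Set Char → List Int
  | [], _ => []
  | c :: t, seen =>
      let seen' := PySem.Set.add seen c
      PySem.Set.len seen' :: goPrefix t seen'

-- suffix pass, right to left: `for j in range(m-1,-1,-1): seen.add(s[j]); suffix[j] = len(seen)`
def goSuffix : List Char → PySem.Set Char × List Int
  | [] => (PySem.Set.empty, [0])
  | c :: t =>
      let p := goSuffix t
      let seen' := PySem.Set.add p.1 c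
      (seen', PySem.Set.len seen' :: p.2)

def solve_alt (s : String) (n : Int) : Int :=
  let cs := s.toList
  let pref := goPrefix cs PySem.Set.empty
  let suff := (goSuffix cs).2
  PySem.List.maxD
    ((PySem.List.pyRange 0 (n - 1) 1).map
      (fun i => PySem.List.pyGetD pref i 0 + PySem.List.pyGetD suff (i + 1) 0))
    (fun x => x) 0

-- ===== PRECONDITION & SPEC =====
-- Pre_ restricts to the problem's natural domain of lowercase strings with n ≤ len(s)+1:
-- A indexes fixed 26-letter buckets by ord(ch)-97, raising IndexError for most non-lowercase
-- characters (and, for codes 71–96, silently wrapping the negative index to a wrong bucket),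
-- and reads s[i] for i < n-1, raising IndexError when n > len(s) + 1.
def Pre_solve (s : String) (n : Int) : Prop :=
  s.toList.all (fun c => 97 ≤ c.toNat && c.toNat ≤ 122) = true ∧ n ≤ (s.toList.length : Int) + 1

instance (s : String) (n : Int) : Decidable (Pre_solve s n) := by unfold Pre_solve; infer_instance

def pvWitness_solve : String × Int := ("abcab", 5)

def Spec_solve (s : String) (n : Int) (out : Int) : Prop := out = solve_alt s n
instance (s : String) (n : Int) (out : Int) : Decidable (Spec_solve s n out) := by unfold Spec_solve; infer_instance

-- ===== CLAIM (what is proved, stated in full; the proofs are below) =====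
def Claim_equal_solve : Prop := ∀ (s : String) (n : Int), Dom_solve s n → Pre_solve s n → Spec_solve s n (solve s n)

-- ===== LEMMAS AND PROOFS =====

-- canonical bucket-count list and distinct count used to describe both programs' states
def cnts (l : List Char) : List Int :=
  (List.range 26).map (fun b => (l.count (Char.ofNat (97 + b)) : Int))

def dcnt (l : List Char) : Int := (l.toFinset.card : Int)

def lowerStr (l : List Char) : Prop := ∀ c ∈ l, 97 ≤ c.toNat ∧ c.toNat ≤ 122

lemma toNat_ofNat_small (nn : Nat) (h : nn < 55296) : (Char.ofNat nn).toNat = nn := by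
  rw [Char.toNat_ofNat, if_pos (Or.inl h)]

lemma cnts_nil : cnts [] = List.replicate 26 0 := by
  simp [cnts]

lemma idx_cast (c : Char) (hc : 97 ≤ c.toNat ∧ c.toNat ≤ 122) :
    (c.toNat : Int) - 97 = ((c.toNat - 97 : Nat) : Int) := by omega

lemma pyGetD_cnts (l : List Char) (c : Char) (hc : 97 ≤ c.toNat ∧ c.toNat ≤ 122) :
    PySem.List.pyGetD (cnts l) ((c.toNat : Int) - 97) 0 = (l.count c : Int) := by
  rw [idx_cast c hc, PySem.List.pyGetD_natCast]
  rw [List.getD_eq_getElem _ _ (by simp [cnts]; omega)]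
  simp only [cnts, List.getElem_map, List.getElem_range]
  congr 2
  have h2 : 97 + (c.toNat - 97) = c.toNat := by omega
  rw [h2, Char.ofNat_toNat]

lemma ofNat_ne (c : Char) (b : Nat) (hb : b < 26) (hne : ¬ (97 + b = c.toNat)) :
    Char.ofNat (97 + b) ≠ c := by
  intro h
  apply hne
  have h3 := toNat_ofNat_small (97 + b) (by omega)
  rw [← h3, h]

lemma cnts_eq_set (l l' : List Char) (c : Char) (hc : 97 ≤ c.toNat ∧ c.toNat ≤ 122)
    (hsame : ∀ x : Char, x ≠ c → l'.count x = l.count x) (v : Int)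
    (hv : (l'.count c : Int) = v) :
    cnts l' = (cnts l).set (c.toNat - 97) v := by
  apply List.ext_getElem
  · simp [cnts]
  · intro b hb hb2
    have hb26 : b < 26 := by simpa [cnts] using hb
    simp only [cnts, List.getElem_map, List.getElem_range, List.getElem_set]
    by_cases hbe : c.toNat - 97 = b
    · subst hbe
      have h2 : 97 + (c.toNat - 97) = c.toNat := by omega
      rw [if_pos rfl]
      rw [h2, Char.ofNat_toNat, hv]
    · rw [if_neg hbe]
      rw [hsame _ (ofNat_ne c b hb26 (by omega))]

lemma cnts_snoc (l : List Char) (c : Char) (hc : 97 ≤ c.toNat ∧ c.toNat ≤ 122) :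
    cnts (l ++ [c]) =
      PySem.List.pySetD (cnts l) ((c.toNat : Int) - 97)
        (PySem.List.pyGetD (cnts l) ((c.toNat : Int) - 97) 0 + 1) := by
  rw [pyGetD_cnts _ _ hc, idx_cast c hc, PySem.List.pySetD_natCast]
  apply cnts_eq_set _ _ _ hc
  · intro x hx
    simp [List.count_append, Ne.symm hx]
  · simp [List.count_append]

lemma cnts_cons_dec (l : List Char) (c : Char) (hc : 97 ≤ c.toNat ∧ c.toNat ≤ 122) :
    PySem.List.pySetD (cnts (c :: l)) ((c.toNat : Int) - 97)
        (PySem.List.pyGetD (cnts (c :: l)) ((c.toNat : Int) - 97) 0 - 1) = cnts l := by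
  rw [pyGetD_cnts _ _ hc, idx_cast c hc, PySem.List.pySetD_natCast]
  symm
  apply cnts_eq_set _ _ _ hc
  · intro x hx
    simp [Ne.symm hx]
  · simp

lemma foldl_bump_eq (l : List Char) (hlc : lowerStr l) :
    l.foldl
      (fun rc ch =>
        PySem.List.pySetD rc ((ch.toNat : Int) - 97)
          (PySem.List.pyGetD rc ((ch.toNat : Int) - 97) 0 + 1))
      (List.replicate 26 0) = cnts l := by
  induction l using List.reverseRecOn with
  | nil => exact cnts_nil.symm
  | append_singleton t c ih =>
      have hlt : lowerStr t := fun x hx => hlc x (by simp [hx])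
      have hc : 97 ≤ c.toNat ∧ c.toNat ≤ 122 := hlc c (by simp)
      rw [List.foldl_append, ih hlt]
      simp only [List.foldl_cons, List.foldl_nil]
      exact (cnts_snoc t c hc).symm

lemma rightInit_eq (s : String) (hlc : lowerStr s.toList) : rightInit s = cnts s.toList :=
  foldl_bump_eq s.toList hlc

lemma dcnt_snoc (l : List Char) (c : Char) :
    dcnt (l ++ [c]) = dcnt l + (if c ∈ l then 0 else 1) := by
  by_cases h : c ∈ l
  · have hsub : ({c} : Finset Char) ⊆ l.toFinset := by simpa using h
    simp [dcnt, h, List.toFinset_append, Finset.union_eq_left.mpr hsub]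
  · simp only [dcnt, List.toFinset_append, List.toFinset_cons, List.toFinset_nil, if_neg h]
    rw [Finset.union_comm, insert_empty_eq, ← Finset.insert_eq,
      Finset.card_insert_of_notMem (by simpa using h)]
    push_cast; ring

lemma dcnt_cons (l : List Char) (c : Char) :
    dcnt (c :: l) = dcnt l + (if c ∈ l then 0 else 1) := by
  by_cases h : c ∈ l
  · have hm : c ∈ l.toFinset := by simpa using h
    simp [dcnt, h, List.toFinset_cons, Finset.insert_eq_self.mpr hm]
  · simp only [dcnt, List.toFinset_cons, if_neg h]
    rw [Finset.card_insert_of_notMem (by simpa using h)]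
    push_cast; ring

lemma length_filter_set_succ (xs : List Int) (i : Nat) (h : i < xs.length) (v : Int)
    (hv : xs[i] = v) (hnn : 0 ≤ v) :
    ((xs.set i (v + 1)).filter (fun x => decide (0 < x))).length
      = (xs.filter (fun x => decide (0 < x))).length + (if v = 0 then 1 else 0) := by
  induction xs generalizing i with
  | nil => simp at h
  | cons x t ih =>
      cases i with
      | zero =>
          simp only [List.getElem_cons_zero] at hv
          subst hv
          simp only [List.set_cons_zero, List.filter_cons]
          have h1 : decide (0 < x + 1) = true := by simp; omega
          rw [h1]
          by_cases hx0 : x = 0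
          · subst hx0; simp
          · have h2 : decide (0 < x) = true := by simp; omega
            rw [h2, if_neg hx0]
            simp
      | succ j =>
          simp only [List.getElem_cons_succ] at hv
          simp only [List.set_cons_succ, List.filter_cons]
          have := ih j (by simpa using h) hv
          cases hd : decide (0 < x) <;> simp [this]; omega

lemma filter_pos_cnts (l : List Char) (hlc : lowerStr l) :
    (((cnts l).filter (fun x => decide (0 < x))).length : Int) = dcnt l := by
  induction l using List.reverseRecOn with
  | nil => simp [cnts_nil, dcnt]
  | append_singleton t c ih =>
      have hlt : lowerStr t := fun x hx => hlc x (by simp [hx])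
      have hc : 97 ≤ c.toNat ∧ c.toNat ≤ 122 := hlc c (by simp)
      rw [cnts_snoc t c hc, pyGetD_cnts t c hc, idx_cast c hc, PySem.List.pySetD_natCast]
      have hlen : c.toNat - 97 < (cnts t).length := by simp [cnts]; omega
      have hget : (cnts t)[c.toNat - 97] = (t.count c : Int) := by
        have h4 := pyGetD_cnts t c hc
        rw [idx_cast c hc, PySem.List.pyGetD_natCast, List.getD_eq_getElem _ _ hlen] at h4
        exact h4
      rw [length_filter_set_succ (cnts t) _ hlen _ hget (by positivity)]
      rw [dcnt_snoc, ← ih hlt]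
      have hiff : ((t.count c : Int) = 0) ↔ ¬ (c ∈ t) := by
        simp [List.count_eq_zero]
      push_cast
      by_cases hm : c ∈ t
      · have h1 : ¬ ((t.count c : Int) = 0) := by rw [hiff]; simp [hm]
        rw [if_neg h1, if_pos hm]
      · have h1 : ((t.count c : Int) = 0) := by rw [hiff]; exact hm
        rw [if_pos h1, if_neg hm]

lemma len_eq_dcnt (seen : PySem.Set Char) (L : List Char) (hn : seen.Nodup)
    (hm : ∀ x, x ∈ seen ↔ x ∈ L) : PySem.Set.len seen = dcnt L := by
  have h1 : seen.toFinset = L.toFinset := by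
    apply Finset.ext
    intro x
    simp [List.mem_toFinset, hm x]
  have h2 : seen.toFinset.card = seen.length := List.toFinset_card_of_nodup hn
  simp only [PySem.Set.len, dcnt, ← h1, h2]

lemma goPrefix_spec (t : List Char) : ∀ (pre : List Char) (seen : PySem.Set Char),
    seen.Nodup → (∀ x, x ∈ seen ↔ x ∈ pre) →
    goPrefix t seen = (List.range t.length).map (fun i => dcnt (pre ++ t.take (i + 1))) := by
  induction t with
  | nil => intro pre seen _ _; simp [goPrefix]
  | cons c t ih =>
      intro pre seen hn hm
      have hn' : (PySem.Set.add seen c).Nodup := PySem.Set.nodup_add seen c hn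
      have hm' : ∀ x, x ∈ PySem.Set.add seen c ↔ x ∈ pre ++ [c] := by
        intro x
        rw [PySem.Set.mem_add]
        simp [hm x]
      rw [goPrefix, ih (pre ++ [c]) _ hn' hm']
      rw [List.length_cons, List.range_succ_eq_map]
      simp only [List.map_cons, List.map_map]
      refine List.cons_eq_cons.mpr ⟨?_, ?_⟩
      · rw [len_eq_dcnt _ (pre ++ [c]) hn' hm']
        simp
      · apply List.map_congr_left
        intro i _
        simp [Function.comp, List.append_assoc]

lemma goSuffix_spec (t : List Char) :
    (goSuffix t).1.Nodup ∧ (∀ x, x ∈ (goSuffix t).1 ↔ x ∈ t) ∧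
      (goSuffix t).2 = (List.range (t.length + 1)).map (fun j => dcnt (t.drop j)) := by
  induction t with
  | nil =>
      refine ⟨List.nodup_nil, ?_, ?_⟩
      · intro x; simp [PySem.Set.empty, goSuffix]
      · simp [goSuffix, dcnt]
  | cons c t ih =>
      obtain ⟨hn, hm, hs⟩ := ih
      have hn' : ((goSuffix t).1.add c).Nodup := PySem.Set.nodup_add _ c hn
      have hm' : ∀ x, x ∈ (goSuffix t).1.add c ↔ x ∈ c :: t := by
        intro x
        rw [PySem.Set.mem_add]
        simp [hm x]
        tauto
      refine ⟨hn', hm', ?_⟩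
      rw [goSuffix]
      simp only [List.length_cons]
      rw [List.range_succ_eq_map, List.map_cons, List.map_map]
      refine List.cons_eq_cons.mpr ⟨?_, ?_⟩
      · rw [len_eq_dcnt _ (c :: t) hn' hm']
        simp
      · rw [hs]
        apply List.map_congr_left
        intro j _
        simp [Function.comp]

lemma maxD_cons_eq (x y : Int) (t : List Int) :
    PySem.List.maxD (x :: y :: t) (fun z => z) 0 = PySem.List.maxD (max x y :: t) (fun z => z) 0 := by
  simp only [PySem.List.maxD, PySem.List.max?, List.foldl_cons]
  rcases lt_or_ge x y with h | h
  · rw [if_pos h, max_eq_right h.le]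
  · rw [if_neg (not_lt.mpr h), max_eq_left h]

lemma maxD_eq_foldl (t : List Int) : ∀ (x d : Int), d ≤ x →
    PySem.List.maxD (x :: t) (fun z => z) 0 = t.foldl max (max d x) := by
  induction t with
  | nil =>
      intro x d hx
      simp [PySem.List.maxD, PySem.List.max?, max_eq_right hx]
  | cons y t ih =>
      intro x d hx
      rw [maxD_cons_eq, ih (max x y) d (le_trans hx (le_max_left x y)), List.foldl_cons,
        max_assoc]

lemma maxD_map_range (m : Nat) (v : Nat → Int) (hv : ∀ j, 0 ≤ v j) :
    PySem.List.maxD ((List.range m).map v) (fun z => z) 0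
      = (List.range m).foldl (fun a j => max a (v j)) 0 := by
  cases m with
  | zero => simp [PySem.List.maxD, PySem.List.max?]
  | succ m' =>
      rw [List.range_succ_eq_map, List.map_cons, maxD_eq_foldl _ (v 0) 0 (hv 0), List.map_map]
      rw [List.foldl_map, List.foldl_cons, List.foldl_map]
      simp [Function.comp]

-- the invariant: after k iterations A's state is the bucket counts / distinct counts of the
-- length-k prefix and its complement suffix, and max_sum is B's running maximum
lemma loopA_state (s : String) (hlc : lowerStr s.toList) (k : Nat) (hk : k ≤ s.toList.length) :
    (List.range k).foldl (fun st (j : Nat) => stepA s st ((j : Nat) : Int))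
        (List.replicate 26 0, rightInit s, 0,
          (((rightInit s).filter (fun x => decide (0 < x))).length : Int), 0)
      = (cnts (s.toList.take k), cnts (s.toList.drop k),
          dcnt (s.toList.take k), dcnt (s.toList.drop k),
          (List.range k).foldl
            (fun a j => max a (dcnt (s.toList.take (j + 1)) + dcnt (s.toList.drop (j + 1)))) 0) := by
  induction k with
  | zero =>
      simp only [List.range_zero, List.foldl_nil, List.take_zero, List.drop_zero]
      rw [rightInit_eq s hlc, filter_pos_cnts _ hlc, cnts_nil]
      simp [dcnt]
  | succ k ih =>
      have hk1 : k < s.toList.length := by omega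
      have hc : 97 ≤ (s.toList[k]).toNat ∧ (s.toList[k]).toNat ≤ 122 :=
        hlc _ (List.getElem_mem hk1)
      rw [List.range_succ, List.foldl_append, List.foldl_cons, List.foldl_nil, ih (by omega)]
      rw [List.foldl_append, List.foldl_cons, List.foldl_nil]
      have hdrop : s.toList.drop k = s.toList[k] :: s.toList.drop (k + 1) :=
        List.drop_eq_getElem_cons hk1
      have htake : s.toList.take (k + 1) = s.toList.take k ++ [s.toList[k]] :=
        List.take_succ_eq_append_getElem hk1
      simp only [stepA, PySem.Str.pyGet?_natCast, List.getElem?_eq_getElem hk1,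
        Option.getD_some]
      rw [hdrop, htake, cnts_cons_dec _ _ hc, ← cnts_snoc _ _ hc]
      rw [pyGetD_cnts _ _ hc, pyGetD_cnts _ _ hc, dcnt_snoc, dcnt_cons]
      have hcnt0 : ∀ (l : List Char),
          (((l.count (s.toList[k]) : Int)) == 0) = (decide (s.toList[k] ∉ l)) := by
        intro l
        rcases Decidable.em (s.toList[k] ∈ l) with h | h
        · simp [h, List.count_eq_zero]
        · simp [h, List.count_eq_zero]
      rw [hcnt0, hcnt0]
      by_cases hmt : s.toList[k] ∈ s.toList.take k <;>
        by_cases hmd : s.toList[k] ∈ s.toList.drop (k + 1) <;>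
          simp [hmt, hmd]

-- ===== VERDICT (by name: the statement is the Claim_ definition above) =====
theorem solve_spec : Claim_equal_solve := by
  intro s n hdom hpre
  unfold Spec_solve
  obtain ⟨hall, hn⟩ := hpre
  have hlc : lowerStr s.toList := by
    intro c hcm
    have h := List.all_eq_true.mp hall c hcm
    simpa using h
  have hmlen : (n - 1).toNat ≤ s.toList.length := by omega
  -- A's side: the fused loop
  simp only [solve]
  rw [PySem.List.pyRange_one, List.foldl_map]
  simp only [zero_add, Int.sub_zero]
  rw [loopA_state s hlc _ hmlen]
  -- B's side: the two tables and the combining pass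
  simp only [solve_alt]
  rw [goPrefix_spec s.toList [] PySem.Set.empty List.nodup_nil
        (by intro x; simp [PySem.Set.empty]),
      (goSuffix_spec s.toList).2.2]
  rw [PySem.List.pyRange_one, List.map_map]
  simp only [zero_add, Int.sub_zero]
  rw [List.map_congr_left (g := fun j : Nat =>
        dcnt (s.toList.take (j + 1)) + dcnt (s.toList.drop (j + 1))) ?_]
  · rw [maxD_map_range _ _ (fun j => by unfold dcnt; positivity)]
  · intro i hi
    have hi' : i < (n - 1).toNat := List.mem_range.mp hi
    simp only [Function.comp]
    have h1 : ((i : Int)) = ((i : Nat) : Int) := rfl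
    have hgp : PySem.List.pyGetD
        ((List.range s.toList.length).map (fun i => dcnt ([] ++ s.toList.take (i + 1)))) (i : Int) 0
          = dcnt (s.toList.take (i + 1)) := by
      rw [PySem.List.pyGetD_natCast,
        List.getD_eq_getElem _ _ (by rw [List.length_map, List.length_range]; omega)]
      simp only [List.getElem_map, List.getElem_range, List.nil_append]
    have hgs : PySem.List.pyGetD
        ((List.range (s.toList.length + 1)).map (fun j => dcnt (s.toList.drop j))) ((i : Int) + 1) 0
          = dcnt (s.toList.drop (i + 1)) := by
      have h2 : ((i : Int) + 1) = (((i + 1 : Nat)) : Int) := by push_cast; ring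
      rw [h2, PySem.List.pyGetD_natCast,
        List.getD_eq_getElem _ _ (by rw [List.length_map, List.length_range]; omega)]
      simp only [List.getElem_map, List.getElem_range]
    rw [hgp, hgs]
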